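-- pv_equiv track=rewrite | github.com/NYUADQCHack2022/NYUAD-2022 | matrix.py | genMat
-- ===== SOURCE A (Python) =====
-- def checkCol(arr,i,j,numOfElementsinrow):
--     '''Given a matrix arr of integers,
--     integers i : index of element one,
--     j : index of the 2nd element
--     & numOfElemenetsInrow represent how many elements we have in a row
--     This function checks and verify if the both elemets are in the same column or not, if yes it turns their matrix position to 1 marking a connection.
--     '''
--     if abs(i-j) % numOfElementsinrow ==0: #If the difference between elements index is a multiple of numOfElementsInRow, then they share the same column
--         arr[i][j]=1
--
-- def checkRow(arr,i,j,numOfElementsInRows):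
--     '''Given a matrix arr of integers,
--     integers i : index of element one,
--     j : index of the 2nd element
--     & numOfElemenetsInrow represent how many elements we have in a row
--     This function checks and verify if the both elemets are in the same row or not, if yes it turns their matrix position to 1 marking a connection.
--     '''
--     if (i // numOfElementsInRows) == (j // numOfElementsInRows): #here we calculate the row of each element by floor division on numOfElementsInRow, and verify if they are equal, if yes they share the same row
--         arr[i][j] = 1
--
-- def genMat(n,numOfElementsInRow):
--     '''Given integer n : a matrix dimenesion (representing the number of elements in the graph),
--     And integer numOfElementsInRow representing the length of the row in the graph,
--     The function will create the nxn matrix of connection between the elements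
--     '''
--     mat = [] #our matrix
--     for i in range(n):
--         mat.append( [0] * n) #creating an nxn matrix of 0s
--     for i in range(len(mat)): # iterating the rows
--         for j in range(len(mat[i])): #iterating the elements in the row
--             if i!=j: # when i==j it means they are the same element so no connection
--                 checkCol(mat,i,j,numOfElementsInRow) #check if they are in the same column, if yes mat[i][j] will be one.
--                 if mat[i][j]==0: #if the checkCol already have set it to one, meaning no need to check the row, else check it
--                     checkRow(mat,i,j,numOfElementsInRow) #check if they are in the same row, if yes mat[i][j] will be one.
--     return mat
-- ===== SOURCE B (Python) =====
-- def genMat(n, numOfElementsInRow):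
--     '''Bucket-based re-implementation: group indices by row key (i // w) and by
--     column key (i % w), then mark every ordered pair of distinct indices that
--     share a bucket.  Entries are written once per connection instead of testing
--     every (i, j) pair with divisions.'''
--     mat = [[0] * n for _ in range(n)]
--     if n <= 1:
--         return mat  # no off-diagonal pairs exist, nothing to mark
--     w = numOfElementsInRow
--     rows = {}
--     cols = {}
--     for i in range(n):
--         rows.setdefault(i // w, []).append(i)
--         cols.setdefault(i % w, []).append(i)
--     for bucket in list(rows.values()) + list(cols.values()):
--         for a in bucket:
--             for b in bucket:
--                 if a != b:
--                     mat[a][b] = 1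
--     return mat
-- ===== Notes on version B (the rewrite author's own statement) =====
-- stated objective: faster
-- what changed: Replaces A's two division tests on every ordered pair (i,j) by grouping the indices once into row buckets (i//w) and column buckets (i%w) and writing mat[a][b]=1 only for the distinct pairs inside each bucket.
import Mathlib
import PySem

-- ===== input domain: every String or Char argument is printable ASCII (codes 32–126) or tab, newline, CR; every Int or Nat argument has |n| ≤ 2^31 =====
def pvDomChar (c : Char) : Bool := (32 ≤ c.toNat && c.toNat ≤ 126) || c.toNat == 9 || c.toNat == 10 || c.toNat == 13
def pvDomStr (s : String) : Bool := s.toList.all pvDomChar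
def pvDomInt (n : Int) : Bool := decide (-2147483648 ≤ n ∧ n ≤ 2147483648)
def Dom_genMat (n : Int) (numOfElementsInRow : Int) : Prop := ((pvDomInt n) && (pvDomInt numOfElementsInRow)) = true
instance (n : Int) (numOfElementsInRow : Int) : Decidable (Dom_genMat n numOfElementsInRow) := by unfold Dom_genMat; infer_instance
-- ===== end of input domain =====

-- B replaces A's per-pair divisibility tests with row/column index buckets (i//w and i%w) and
-- writes only the 1-entries within each bucket (objective: faster, constant-factor, as measured
-- in a timing run). Return values only; neither implementation mutates its arguments.

-- shared mutation primitive: arr[i][j] = v; both programs only use it with 0 ≤ i,j in range,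
-- where List.set at Int.toNat is exact
def setE (m : List (List Int)) (i j : Int) (v : Int) : List (List Int) :=
  m.set i.toNat ((m.getD i.toNat []).set j.toNat v)

-- ===== PORT A =====
def checkCol (arr : List (List Int)) (i j numOfElementsinrow : Int) : List (List Int) :=
  if PySem.Int.mod |i - j| numOfElementsinrow = 0 then setE arr i j 1 else arr

def checkRow (arr : List (List Int)) (i j numOfElementsInRows : Int) : List (List Int) :=
  if PySem.Int.floordiv i numOfElementsInRows = PySem.Int.floordiv j numOfElementsInRows then
    setE arr i j 1
  else arr

def genMat (n : Int) (numOfElementsInRow : Int) : List (List Int) :=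
  -- mat = []; for i in range(n): mat.append([0]*n)
  let mat := (PySem.List.pyRange 0 n 1).foldl (fun m _ => m ++ [List.replicate n.toNat (0 : Int)]) []
  -- nested index loops of A; the in-range reads mat[i][j] are rendered with getD (exact here)
  (PySem.List.pyRange 0 (mat.length : Int) 1).foldl (fun m i =>
    (PySem.List.pyRange 0 ((m.getD i.toNat []).length : Int) 1).foldl (fun m' j =>
      if i ≠ j then
        let m1 := checkCol m' i j numOfElementsInRow
        if (m1.getD i.toNat []).getD j.toNat 0 = 0 then checkRow m1 i j numOfElementsInRow
        else m1
      else m') m) mat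

-- ===== PORT B =====
def genMat_alt (n : Int) (numOfElementsInRow : Int) : List (List Int) :=
  let mat := (PySem.List.pyRange 0 n 1).map (fun _ => List.replicate n.toNat (0 : Int))
  if n ≤ 1 then mat
  else
    let w := numOfElementsInRow
    let rows := (PySem.List.pyRange 0 n 1).foldl
      (fun d i => d.modify (PySem.Int.floordiv i w) [] (· ++ [i])) PySem.Dict.empty
    let cols := (PySem.List.pyRange 0 n 1).foldl
      (fun d i => d.modify (PySem.Int.mod i w) [] (· ++ [i])) PySem.Dict.empty
    (rows.values ++ cols.values).foldl (fun m bucket =>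
      bucket.foldl (fun m a =>
        bucket.foldl (fun m b => if a ≠ b then setE m a b 1 else m) m) m) mat

-- ===== PRECONDITION & SPEC =====
-- Pre_ excludes exactly the inputs where Python A raises ZeroDivisionError:
-- numOfElementsInRow = 0 together with n ≥ 2 (only then is an off-diagonal pair examined).
def Pre_genMat (n : Int) (numOfElementsInRow : Int) : Prop :=
  numOfElementsInRow ≠ 0 ∨ n ≤ 1
instance (n : Int) (numOfElementsInRow : Int) : Decidable (Pre_genMat n numOfElementsInRow) := by
  unfold Pre_genMat; infer_instance

def pvWitness_genMat : Int × Int := (4, 2)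

def Spec_genMat (n : Int) (numOfElementsInRow : Int) (out : List (List Int)) : Prop := out = genMat_alt n numOfElementsInRow
instance (n : Int) (numOfElementsInRow : Int) (out : List (List Int)) : Decidable (Spec_genMat n numOfElementsInRow out) := by unfold Spec_genMat; infer_instance

-- ===== CLAIM (what is proved, stated in full; the proofs are below) =====
def Claim_equal_genMat : Prop := ∀ (n : Int) (numOfElementsInRow : Int), Dom_genMat n numOfElementsInRow → Pre_genMat n numOfElementsInRow → Spec_genMat n numOfElementsInRow (genMat n numOfElementsInRow)

-- ===== LEMMAS AND PROOFS =====
def getE (m : List (List Int)) (x y : Nat) : Int := ((m[x]?.getD [])[y]?).getD 0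

def Shape (N : Nat) (m : List (List Int)) : Prop :=
  m.length = N ∧ ∀ r ∈ m, r.length = N

theorem shape_setE {N : Nat} {m : List (List Int)} (i j v : Int) (h : Shape N m) :
    Shape N (setE m i j v) := by
  obtain ⟨h1, h2⟩ := h
  refine ⟨by simp [setE, h1], ?_⟩
  intro r hr
  by_cases hi : i.toNat < m.length
  · rcases List.mem_or_eq_of_mem_set hr with h | h
    · exact h2 r h
    · subst h
      rw [List.length_set, List.getD_eq_getElem _ _ hi]
      exact h2 _ (List.getElem_mem hi)
  · rw [setE, List.set_eq_of_length_le (by omega)] at hr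
    exact h2 r hr

theorem getE_setE_self {N : Nat} {m : List (List Int)} (hs : Shape N m) {a b : Nat}
    (ha : a < N) (hb : b < N) (v : Int) :
    getE (setE m (a : Int) (b : Int) v) a b = v := by
  obtain ⟨h1, h2⟩ := hs
  have ha' : a < m.length := h1 ▸ ha
  have hrow : (m.getD a []).length = N := by
    rw [List.getD_eq_getElem _ _ ha']; exact h2 _ (List.getElem_mem ha')
  simp only [setE, getE, Int.toNat_natCast, List.getElem?_set]
  rw [List.getD_eq_getElem _ _ ha'] at hrow
  simp [ha', List.getElem?_set, List.getD_eq_getElem _ _ ha', hrow, hb]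

theorem getE_setE_ne {m : List (List Int)} {a b x y : Nat}
    (h : x ≠ a ∨ y ≠ b) (v : Int) :
    getE (setE m (a : Int) (b : Int) v) x y = getE m x y := by
  simp only [setE, getE, Int.toNat_natCast, List.getElem?_set]
  rcases h with h | h
  · simp [Ne.symm h]
  · by_cases hax : a = x
    · subst hax
      by_cases ha' : a < m.length
      · simp [ha', List.getElem?_set, Ne.symm h, List.getD_eq_getElem _ _ ha']
      · simp [ha']
    · simp [hax]

theorem getE_zero (N : Nat) (x y : Nat) :
    getE (List.replicate N (List.replicate N (0:Int))) x y = 0 := by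
  simp only [getE, List.getElem?_replicate]
  split_ifs <;> simp

theorem modAbs_eq_zero_iff (w x : Int) : PySem.Int.mod |x| w = 0 ↔ w ∣ x := by
  rw [PySem.Int.mod_eq_zero_iff_dvd]; exact dvd_abs w x

theorem mod_eq_mod_iff_dvd_sub {w : Int} (hw : w ≠ 0) (x y : Int) :
    PySem.Int.mod x w = PySem.Int.mod y w ↔ w ∣ (x - y) := by
  have hx := PySem.Int.floordiv_mul_add_mod x w
  have hy := PySem.Int.floordiv_mul_add_mod y w
  constructor
  · intro h
    exact ⟨PySem.Int.floordiv x w - PySem.Int.floordiv y w, by linarith [h]⟩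
  · rintro ⟨k, hk⟩
    have hsub : PySem.Int.mod x w - PySem.Int.mod y w =
        (k - PySem.Int.floordiv x w + PySem.Int.floordiv y w) * w := by ring_nf; linarith
    rcases lt_or_gt_of_ne hw with hneg | hpos
    · have b1 := PySem.Int.mod_neg_bounds (a := x) hneg
      have b2 := PySem.Int.mod_neg_bounds (a := y) hneg
      have : (k - PySem.Int.floordiv x w + PySem.Int.floordiv y w) = 0 := by
        by_contra hne
        rcases lt_or_gt_of_ne hne with h | h
        · nlinarith
        · nlinarith
      rw [this, zero_mul] at hsub; linarith
    · have b1 := PySem.Int.mod_nonneg (a := x) hpos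
      have b2 := PySem.Int.mod_nonneg (a := y) hpos
      have c1 := PySem.Int.mod_lt (a := x) hpos
      have c2 := PySem.Int.mod_lt (a := y) hpos
      have : (k - PySem.Int.floordiv x w + PySem.Int.floordiv y w) = 0 := by
        by_contra hne
        rcases lt_or_gt_of_ne hne with h | h
        · nlinarith
        · nlinarith
      rw [this, zero_mul] at hsub; linarith

def tgt (w x y : Int) : Int :=
  if x ≠ y ∧ (PySem.Int.mod (x - y) w = 0 ∨ PySem.Int.floordiv x w = PySem.Int.floordiv y w)
  then 1 else 0

def bodyA (w i : Int) (m : List (List Int)) (j : Int) : List (List Int) :=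
  if i ≠ j then
    let m1 := checkCol m i j w
    if (m1.getD i.toNat []).getD j.toNat 0 = 0 then checkRow m1 i j w else m1
  else m

theorem read_eq (m : List (List Int)) (x y : Nat) :
    (m.getD x []).getD y 0 = getE m x y := by
  simp [getE, List.getD_eq_getElem?_getD]

theorem bodyA_eq {w : Int} (hw : w ≠ 0) {N : Nat} {m : List (List Int)} (hs : Shape N m)
    {a b : Nat} (ha : a < N) (hb : b < N) (h0 : getE m a b = 0) :
    bodyA w (a : Int) m (b : Int) = if tgt w a b = 1 then setE m (a:Int) (b:Int) 1 else m := by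
  unfold bodyA checkCol checkRow tgt
  by_cases hab : (a : Int) = (b : Int)
  · simp [hab]
  · simp only [hab, Ne, not_false_iff, if_true, ite_not]
    by_cases hc : PySem.Int.mod |(a:Int) - b| w = 0
    · have hc' : PySem.Int.mod ((a:Int) - b) w = 0 := by
        rw [PySem.Int.mod_eq_zero_iff_dvd]; exact (modAbs_eq_zero_iff w _).1 hc
      simp only [hc, if_true, hc', true_or, and_true, if_pos]
      rw [Int.toNat_natCast, Int.toNat_natCast, read_eq, getE_setE_self hs ha hb]
      simp [hab]
    · have hc' : ¬ PySem.Int.mod ((a:Int) - b) w = 0 := by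
        rw [PySem.Int.mod_eq_zero_iff_dvd]
        intro hd
        exact hc ((modAbs_eq_zero_iff w _).2 hd)
      simp only [hc, if_false, Int.toNat_natCast, read_eq, h0, if_pos rfl, hc', false_or]
      by_cases hr : PySem.Int.floordiv (a:Int) w = PySem.Int.floordiv (b:Int) w <;>
        simp [hr, hab]

theorem innerA {w : Int} (hw : w ≠ 0) {N : Nat} (a : Nat) (ha : a < N) :
    ∀ (js : List Nat) (m : List (List Int)), (∀ j ∈ js, j < N) → js.Nodup →
      Shape N m → (∀ j ∈ js, getE m a j = 0) →
      Shape N ((js.map (Nat.cast : Nat → Int)).foldl (bodyA w (a : Int)) m) ∧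
      ∀ x y : Nat, getE ((js.map (Nat.cast : Nat → Int)).foldl (bodyA w (a : Int)) m) x y =
        if x = a ∧ y ∈ js then tgt w a y else getE m x y := by
  intro js
  induction js with
  | nil => intro m _ _ hs _; exact ⟨hs, fun x y => by simp⟩
  | cons b rest ih =>
    intro m hlt hnd hs h0
    have hb : b < N := hlt b (List.mem_cons_self ..)
    have h0b : getE m a b = 0 := h0 b (List.mem_cons_self ..)
    have hstep : bodyA w (a:Int) m (b:Int) = if tgt w a b = 1 then setE m (a:Int) (b:Int) 1 else m :=
      bodyA_eq hw hs ha hb h0b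
    set m' := bodyA w (a:Int) m (b:Int) with hm'
    have hs' : Shape N m' := by
      rw [hstep]; split_ifs with h
      · exact shape_setE _ _ _ hs
      · exact hs
    have hent : ∀ x y : Nat, getE m' x y = if x = a ∧ y = b then tgt w a b else getE m x y := by
      intro x y
      rw [hstep]
      by_cases hxy : x = a ∧ y = b
      · rw [if_pos hxy]
        obtain ⟨rfl, rfl⟩ := hxy
        split_ifs with h
        · rw [getE_setE_self hs ha hb 1, h]
        · rw [h0b]
          unfold tgt at h ⊢
          split_ifs at h ⊢ with hc
          · exact absurd rfl h
          · rfl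
      · have hne : x ≠ a ∨ y ≠ b := by tauto
        split_ifs with h
        · simp [hxy, getE_setE_ne hne]
        · simp [hxy]
    have h0' : ∀ j ∈ rest, getE m' a j = 0 := by
      intro j hj
      rw [hent]
      have : j ≠ b := by rintro rfl; exact (List.nodup_cons.1 hnd).1 hj
      simp [this, h0 j (List.mem_cons_of_mem _ hj)]
    obtain ⟨ihS, ihE⟩ := ih m' (fun j hj => hlt j (List.mem_cons_of_mem _ hj))
      (List.nodup_cons.1 hnd).2 hs' h0'
    rw [List.map_cons, List.foldl_cons, ← hm']
    refine ⟨ihS, ?_⟩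
    intro x y
    rw [ihE x y, hent]
    by_cases hx : x = a
    · subst hx
      by_cases hyr : y ∈ rest
      · simp [hyr]
      · by_cases hyb : y = b
        · subst hyb; simp [hyr]
        · simp [hyr, hyb]
    · simp [hx]

theorem pyRange_int (n : Int) :
    PySem.List.pyRange 0 n 1 = (List.range n.toNat).map (Nat.cast : Nat → Int) := by
  rw [PySem.List.pyRange_one]
  simp

theorem pyRange_natcast (N : Nat) :
    PySem.List.pyRange 0 (N : Int) 1 = (List.range N).map (Nat.cast : Nat → Int) := by
  rw [PySem.List.pyRange_one]
  simp

def bodyO (w : Int) (m : List (List Int)) (i : Int) : List (List Int) :=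
  (PySem.List.pyRange 0 ((m.getD i.toNat []).length : Int) 1).foldl (bodyA w i) m

theorem outerA {w : Int} (hw : w ≠ 0) {N : Nat} :
    ∀ (is : List Nat) (m : List (List Int)), (∀ i ∈ is, i < N) → is.Nodup →
      Shape N m → (∀ i ∈ is, ∀ y, getE m i y = 0) →
      Shape N ((is.map (Nat.cast : Nat → Int)).foldl (bodyO w) m) ∧
      ∀ x y : Nat, getE ((is.map (Nat.cast : Nat → Int)).foldl (bodyO w) m) x y =
        if x ∈ is ∧ y < N then tgt w x y else getE m x y := by
  intro is
  induction is with
  | nil => intro m _ _ hs _; exact ⟨hs, fun x y => by simp⟩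
  | cons a rest ih =>
    intro m hlt hnd hs h0
    have ha : a < N := hlt a (List.mem_cons_self ..)
    have ha' : a < m.length := hs.1 ▸ ha
    have hrow : (m.getD a []).length = N := by
      rw [List.getD_eq_getElem _ _ ha']; exact hs.2 _ (List.getElem_mem ha')
    have hbody : bodyO w m ((a : Nat) : Int) = ((List.range N).map (Nat.cast : Nat → Int)).foldl (bodyA w (a : Int)) m := by
      unfold bodyO
      rw [Int.toNat_natCast, hrow, pyRange_natcast]
    obtain ⟨hS1, hE1⟩ := innerA hw a ha (List.range N) m (fun j hj => List.mem_range.1 hj)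
      (List.nodup_range) hs (fun j _ => h0 a (List.mem_cons_self ..) j)
    rw [List.map_cons, List.foldl_cons, hbody]
    set m' := ((List.range N).map (Nat.cast : Nat → Int)).foldl (bodyA w (a : Int)) m with hm'
    have h0' : ∀ i ∈ rest, ∀ y, getE m' i y = 0 := by
      intro i hi y
      rw [hE1]
      have hia : i ≠ a := by rintro rfl; exact (List.nodup_cons.1 hnd).1 hi
      simp [hia, h0 i (List.mem_cons_of_mem _ hi)]
    obtain ⟨ihS, ihE⟩ := ih m' (fun i hi => hlt i (List.mem_cons_of_mem _ hi))
      (List.nodup_cons.1 hnd).2 hS1 h0'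
    refine ⟨ihS, ?_⟩
    intro x y
    rw [ihE x y, hE1 x y]
    by_cases hy : y < N
    · by_cases hxr : x ∈ rest
      · simp [hxr, hy]
      · by_cases hxa : x = a
        · subst hxa
          simp [hxr, hy, List.mem_range]
        · simp [hxr, hxa, hy]
    · simp [hy, List.mem_range]

theorem mat0_eq (n : Int) :
    (PySem.List.pyRange 0 n 1).foldl (fun m _ => m ++ [List.replicate n.toNat (0 : Int)]) []
      = List.replicate n.toNat (List.replicate n.toNat (0 : Int)) := by
  rw [PySem.List.foldl_append_singleton_eq_map]
  simp [List.map_const', PySem.List.length_pyRange_one]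

theorem shape_zero (N : Nat) : Shape N (List.replicate N (List.replicate N (0:Int))) := by
  exact ⟨by simp, fun r hr => by rw [List.eq_of_mem_replicate hr]; simp⟩

theorem genMat_char {n w : Int} (hw : w ≠ 0) :
    Shape n.toNat (genMat n w) ∧ ∀ x y : Nat, getE (genMat n w) x y =
      if x < n.toNat ∧ y < n.toNat then tgt w x y else 0 := by
  have hg : genMat n w =
      ((List.range n.toNat).map (Nat.cast : Nat → Int)).foldl (bodyO w)
        (List.replicate n.toNat (List.replicate n.toNat (0:Int))) := by
    simp only [genMat, mat0_eq]
    rw [List.length_replicate, pyRange_natcast]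
    rfl
  rw [hg]
  obtain ⟨hS, hE⟩ := outerA hw (List.range n.toNat)
    (List.replicate n.toNat (List.replicate n.toNat (0:Int)))
    (fun i hi => List.mem_range.1 hi) List.nodup_range (shape_zero _)
    (fun i _ y => getE_zero _ _ _)
  refine ⟨hS, ?_⟩
  intro x y
  rw [hE x y]
  simp [List.mem_range, getE_zero]

def canon (w : Int) (N : Nat) : List (List Int) :=
  (List.range N).map (fun x : Nat => (List.range N).map (fun y : Nat => tgt w (x : Int) (y : Int)))

theorem eq_canon {w : Int} {N : Nat} {m : List (List Int)} (hs : Shape N m)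
    (he : ∀ x y : Nat, x < N → y < N → getE m x y = tgt w x y) : m = canon w N := by
  have hlen : m.length = N := hs.1
  apply List.ext_getElem?
  intro i
  by_cases hi : i < N
  · have hi' : i < m.length := by omega
    have hrow : (canon w N)[i]? = some ((List.range N).map (fun y : Nat => tgt w (i : Int) (y : Int))) := by
      simp [canon, List.getElem?_map, List.getElem?_range, hi]
    rw [List.getElem?_eq_getElem hi', hrow]
    have hrl : m[i].length = N := hs.2 _ (List.getElem_mem hi')
    refine congrArg some ?_
    apply List.ext_getElem?
    intro j
    by_cases hj : j < N
    · have hj' : j < m[i].length := by omega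
      have := he i j hi hj
      unfold getE at this
      rw [List.getElem?_eq_getElem hi', Option.getD_some,
        List.getElem?_eq_getElem hj', Option.getD_some] at this
      rw [List.getElem?_eq_getElem hj']
      simp [List.getElem?_map, List.getElem?_range, hj, this]
    · rw [List.getElem?_eq_none (by omega), List.getElem?_eq_none (by simp; omega)]
  · rw [List.getElem?_eq_none (by omega), List.getElem?_eq_none (by simp [canon]; omega)]

theorem ite_union {c1 c2 c3 : Prop} [Decidable c1] [Decidable c2] [Decidable c3] (g : Int)
    (h1 : c1 → c3) (h2 : c2 → c3) (h3 : c3 → c1 ∨ c2) :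
    (if c1 then (1:Int) else if c2 then 1 else g) = if c3 then 1 else g := by
  split_ifs <;> tauto

-- B side: innermost pair-writing loop

theorem B1 {N : Nat} (a : Nat) (ha : a < N) :
    ∀ (bs : List Nat) (m : List (List Int)), (∀ b ∈ bs, b < N) → Shape N m →
      Shape N ((bs.map (Nat.cast : Nat → Int)).foldl
        (fun m b => if ((a : Nat) : Int) ≠ b then setE m ((a : Nat) : Int) b 1 else m) m) ∧
      ∀ x y : Nat, getE ((bs.map (Nat.cast : Nat → Int)).foldl
        (fun m b => if ((a : Nat) : Int) ≠ b then setE m ((a : Nat) : Int) b 1 else m) m) x y =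
        if x = a ∧ y ∈ bs ∧ y ≠ a then 1 else getE m x y := by
  intro bs
  induction bs with
  | nil => intro m _ hs; exact ⟨hs, fun x y => by simp⟩
  | cons b rest ih =>
    intro m hlt hs
    have hb : b < N := hlt b (List.mem_cons_self ..)
    rw [List.map_cons, List.foldl_cons]
    set m' := if ((a : Nat) : Int) ≠ ((b : Nat) : Int) then setE m ((a : Nat) : Int) ((b : Nat) : Int) 1 else m with hm'
    have hs' : Shape N m' := by
      rw [hm']; split_ifs with h
      · exact shape_setE _ _ _ hs
      · exact hs
    have hent : ∀ x y : Nat, getE m' x y = if x = a ∧ y = b ∧ b ≠ a then 1 else getE m x y := by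
      intro x y
      rw [hm']
      by_cases hba : b = a
      · subst hba; simp
      · have : ((a : Nat) : Int) ≠ ((b : Nat) : Int) := by
          intro hc; exact hba (by exact_mod_cast hc.symm)
        rw [if_pos this]
        by_cases hxy : x = a ∧ y = b
        · obtain ⟨rfl, rfl⟩ := hxy
          rw [getE_setE_self hs ha hb 1, if_pos ⟨rfl, rfl, hba⟩]
        · have hne : x ≠ a ∨ y ≠ b := by tauto
          rw [getE_setE_ne hne, if_neg (by tauto)]
    obtain ⟨ihS, ihE⟩ := ih m' (fun j hj => hlt j (List.mem_cons_of_mem _ hj)) hs'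
    refine ⟨ihS, ?_⟩
    intro x y
    rw [ihE x y, hent x y]
    simp only [List.mem_cons]
    refine ite_union _ ?_ ?_ ?_
    · rintro ⟨rfl, hr, hya⟩; exact ⟨rfl, Or.inr hr, hya⟩
    · rintro ⟨rfl, rfl, hba⟩; exact ⟨rfl, Or.inl rfl, hba⟩
    · rintro ⟨rfl, hy, hya⟩
      rcases hy with rfl | hr
      · exact Or.inr ⟨rfl, rfl, hya⟩
      · exact Or.inl ⟨rfl, hr, hya⟩

theorem B2 {N : Nat} (bs : List Nat) (hbs : ∀ v ∈ bs, v < N) :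
    ∀ (as : List Nat) (m : List (List Int)), (∀ v ∈ as, v < N) → Shape N m →
      Shape N ((as.map (Nat.cast : Nat → Int)).foldl
        (fun m a => (bs.map (Nat.cast : Nat → Int)).foldl
          (fun m b => if a ≠ b then setE m a b 1 else m) m) m) ∧
      ∀ x y : Nat, getE ((as.map (Nat.cast : Nat → Int)).foldl
        (fun m a => (bs.map (Nat.cast : Nat → Int)).foldl
          (fun m b => if a ≠ b then setE m a b 1 else m) m) m) x y =
        if x ∈ as ∧ y ∈ bs ∧ y ≠ x then 1 else getE m x y := by
  intro as
  induction as with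
  | nil => intro m _ hs; exact ⟨hs, fun x y => by simp⟩
  | cons a rest ih =>
    intro m hlt hs
    have ha : a < N := hlt a (List.mem_cons_self ..)
    rw [List.map_cons, List.foldl_cons]
    obtain ⟨hS1, hE1⟩ := B1 a ha bs m hbs hs
    set m' := (bs.map (Nat.cast : Nat → Int)).foldl
      (fun m b => if ((a : Nat) : Int) ≠ b then setE m ((a : Nat) : Int) b 1 else m) m with hm'
    obtain ⟨ihS, ihE⟩ := ih m' (fun v hv => hlt v (List.mem_cons_of_mem _ hv)) hS1
    refine ⟨ihS, ?_⟩
    intro x y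
    rw [ihE x y, hE1 x y]
    simp only [List.mem_cons]
    refine ite_union _ ?_ ?_ ?_
    · rintro ⟨hr, hy, hyx⟩; exact ⟨Or.inr hr, hy, hyx⟩
    · rintro ⟨rfl, hy, hya⟩; exact ⟨Or.inl rfl, hy, hya⟩
    · rintro ⟨hx, hy, hyx⟩
      rcases hx with rfl | hr
      · exact Or.inr ⟨rfl, hy, hyx⟩
      · exact Or.inl ⟨hr, hy, hyx⟩

theorem B3 {N : Nat} :
    ∀ (Bs : List (List Nat)) (m : List (List Int)), (∀ L ∈ Bs, ∀ v ∈ L, v < N) → Shape N m →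
      Shape N ((Bs.map (fun L => L.map (Nat.cast : Nat → Int))).foldl
        (fun m bucket => bucket.foldl
          (fun m a => bucket.foldl (fun m b => if a ≠ b then setE m a b 1 else m) m) m) m) ∧
      ∀ x y : Nat, getE ((Bs.map (fun L => L.map (Nat.cast : Nat → Int))).foldl
        (fun m bucket => bucket.foldl
          (fun m a => bucket.foldl (fun m b => if a ≠ b then setE m a b 1 else m) m) m) m) x y =
        if ∃ L ∈ Bs, x ∈ L ∧ y ∈ L ∧ y ≠ x then 1 else getE m x y := by
  intro Bs
  induction Bs with
  | nil => intro m _ hs; exact ⟨hs, fun x y => by simp⟩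
  | cons L rest ih =>
    intro m hlt hs
    rw [List.map_cons, List.foldl_cons]
    obtain ⟨hS1, hE1⟩ := B2 L (hlt L (List.mem_cons_self ..)) L m (hlt L (List.mem_cons_self ..)) hs
    set m' := (L.map (Nat.cast : Nat → Int)).foldl
      (fun m a => (L.map (Nat.cast : Nat → Int)).foldl
        (fun m b => if a ≠ b then setE m a b 1 else m) m) m with hm'
    obtain ⟨ihS, ihE⟩ := ih m' (fun L' hL' => hlt L' (List.mem_cons_of_mem _ hL')) hS1
    refine ⟨ihS, ?_⟩
    intro x y
    rw [ihE x y, hE1 x y]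
    refine ite_union _ ?_ ?_ ?_
    · rintro ⟨L', hL', h⟩; exact ⟨L', List.mem_cons_of_mem _ hL', h⟩
    · rintro h; exact ⟨L, List.mem_cons_self .., h⟩
    · rintro ⟨L', hL', h⟩
      rcases List.mem_cons.1 hL' with rfl | hr
      · exact Or.inr h
      · exact Or.inl ⟨L', hr, h⟩

theorem keys_groupFold (l : List Int) (key : Int → Int) :
    (l.foldl (fun d i => d.modify (key i) ([] : List Int) (· ++ [i])) PySem.Dict.empty).keys
      = PySem.Set.ofList (l.map key) := by
  rw [PySem.Dict.keys_foldl_modify_key]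
  simp [PySem.Set.update_nil_left]

theorem nodup_keys_groupFold (l : List Int) (key : Int → Int) :
    (l.foldl (fun d i => d.modify (key i) ([] : List Int) (· ++ [i])) PySem.Dict.empty).keys.Nodup := by
  apply PySem.Dict.nodup_keys_foldl_modify_key
  simp

theorem getD_groupFold (l : List Int) (key : Int → Int) (k : Int) :
    (l.foldl (fun d i => d.modify (key i) ([] : List Int) (· ++ [i])) PySem.Dict.empty).getD k []
      = l.filter (fun i => key i == k) := by
  rw [show (l.foldl (fun d i => d.modify (key i) ([] : List Int) (· ++ [i])) PySem.Dict.empty)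
      = (l.map (fun i => (key i, i))).foldl (fun d p => d.modify p.1 [] (· ++ [p.2])) PySem.Dict.empty from by
    rw [List.foldl_map]]
  rw [PySem.Dict.getD_foldl_modify_append, PySem.Dict.getD_empty]
  rw [List.filter_map, List.map_map]
  have : ((fun (x : Int × Int) => x.2) ∘ fun i => (key i, i)) = id := rfl
  rw [this, List.map_id]
  rfl

theorem values_groupFold (key : Int → Int) (N : Nat) :
    ((((List.range N).map (Nat.cast : Nat → Int)).foldl
        (fun d i => d.modify (key i) ([] : List Int) (· ++ [i])) PySem.Dict.empty)).values
      = ((PySem.Set.ofList ((List.range N).map (fun i : Nat => key (Nat.cast i)))).map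
          (fun k => (List.range N).filter (fun i : Nat => key (Nat.cast i) == k))).map
          (fun L => L.map (Nat.cast : Nat → Int)) := by
  rw [PySem.Dict.values_eq_map_keys _ (nodup_keys_groupFold _ key) []]
  rw [keys_groupFold]
  rw [List.map_congr_left (fun k _ => getD_groupFold ((List.range N).map (Nat.cast : Nat → Int)) key k)]
  rw [List.map_map, List.map_map]
  apply List.map_congr_left
  intro k _
  rw [Function.comp_apply, List.filter_map]
  rfl

theorem bucket_cond_iff {w : Int} (hw : w ≠ 0) (N : Nat) (x y : Nat) (hx : x < N) (hy : y < N) :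
    (∃ L ∈ ((PySem.Set.ofList ((List.range N).map (fun i : Nat => PySem.Int.floordiv (Nat.cast i) w))).map
            (fun k => (List.range N).filter (fun i : Nat => PySem.Int.floordiv (Nat.cast i) w == k))
          ++ (PySem.Set.ofList ((List.range N).map (fun i : Nat => PySem.Int.mod (Nat.cast i) w))).map
            (fun k => (List.range N).filter (fun i : Nat => PySem.Int.mod (Nat.cast i) w == k))),
        x ∈ L ∧ y ∈ L ∧ y ≠ x)
    ↔ ((x : Int) ≠ (y : Int) ∧ (PySem.Int.mod ((x : Int) - (y : Int)) w = 0 ∨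
        PySem.Int.floordiv (x : Int) w = PySem.Int.floordiv (y : Int) w)) := by
  constructor
  · rintro ⟨L, hL, hxL, hyL, hyx⟩
    have hxy : (x : Int) ≠ (y : Int) := fun h => hyx (by exact_mod_cast h.symm)
    rcases List.mem_append.1 hL with h | h
    · obtain ⟨k, _, rfl⟩ := List.mem_map.1 h
      have h1 := (List.mem_filter.1 hxL).2
      have h2 := (List.mem_filter.1 hyL).2
      simp only [beq_iff_eq] at h1 h2
      exact ⟨hxy, Or.inr (h1.trans h2.symm)⟩
    · obtain ⟨k, _, rfl⟩ := List.mem_map.1 h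
      have h1 := (List.mem_filter.1 hxL).2
      have h2 := (List.mem_filter.1 hyL).2
      simp only [beq_iff_eq] at h1 h2
      refine ⟨hxy, Or.inl ?_⟩
      rw [PySem.Int.mod_eq_zero_iff_dvd]
      exact (mod_eq_mod_iff_dvd_sub hw _ _).1 (h1.trans h2.symm)
  · rintro ⟨hxy, hcase⟩
    have hyx : y ≠ x := fun h => hxy (by rw [h])
    rcases hcase with hm | hd
    · have hmm : PySem.Int.mod (x : Int) w = PySem.Int.mod (y : Int) w :=
        (mod_eq_mod_iff_dvd_sub hw _ _).2 ((PySem.Int.mod_eq_zero_iff_dvd _ _).1 hm)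
      refine ⟨_, List.mem_append.2 (Or.inr (List.mem_map.2 ⟨PySem.Int.mod (x : Int) w, ?_, rfl⟩)),
        ?_, ?_, hyx⟩
      · exact (PySem.Set.mem_ofList _ _).2 (List.mem_map.2 ⟨x, List.mem_range.2 hx, rfl⟩)
      · exact List.mem_filter.2 ⟨List.mem_range.2 hx, by simp⟩
      · exact List.mem_filter.2 ⟨List.mem_range.2 hy, by simp [hmm]⟩
    · refine ⟨_, List.mem_append.2 (Or.inl (List.mem_map.2 ⟨PySem.Int.floordiv (x : Int) w, ?_, rfl⟩)),
        ?_, ?_, hyx⟩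
      · exact (PySem.Set.mem_ofList _ _).2 (List.mem_map.2 ⟨x, List.mem_range.2 hx, rfl⟩)
      · exact List.mem_filter.2 ⟨List.mem_range.2 hx, by simp⟩
      · exact List.mem_filter.2 ⟨List.mem_range.2 hy, by simp [hd]⟩

theorem mat0_map_eq (n : Int) :
    (PySem.List.pyRange 0 n 1).map (fun _ => List.replicate n.toNat (0 : Int))
      = List.replicate n.toNat (List.replicate n.toNat (0 : Int)) := by
  rw [List.map_const', PySem.List.length_pyRange_one]
  norm_num

theorem genMat_alt_char {n w : Int} (hw : w ≠ 0) (hn : ¬ n ≤ 1) :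
    genMat_alt n w = canon w n.toNat := by
  simp only [genMat_alt, if_neg hn]
  rw [mat0_map_eq, pyRange_int]
  rw [values_groupFold (fun i => PySem.Int.floordiv i w) n.toNat,
    values_groupFold (fun i => PySem.Int.mod i w) n.toNat,
    ← List.map_append]
  have hbound : ∀ L ∈ ((PySem.Set.ofList ((List.range n.toNat).map
        (fun i : Nat => PySem.Int.floordiv (Nat.cast i) w))).map
        (fun k => (List.range n.toNat).filter (fun i : Nat => PySem.Int.floordiv (Nat.cast i) w == k))
      ++ (PySem.Set.ofList ((List.range n.toNat).map (fun i : Nat => PySem.Int.mod (Nat.cast i) w))).map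
        (fun k => (List.range n.toNat).filter (fun i : Nat => PySem.Int.mod (Nat.cast i) w == k))),
      ∀ v ∈ L, v < n.toNat := by
    intro L hL v hv
    rcases List.mem_append.1 hL with h | h <;>
    · obtain ⟨k, _, rfl⟩ := List.mem_map.1 h
      exact List.mem_range.1 (List.mem_filter.1 hv).1
  obtain ⟨hS, hE⟩ := B3 (N := n.toNat) _
    (List.replicate n.toNat (List.replicate n.toNat (0:Int))) hbound (shape_zero _)
  apply eq_canon hS
  intro x y hx hy
  rw [hE x y]
  rw [getE_zero]
  unfold tgt
  split_ifs with hc hd hd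
  · rfl
  · exact absurd ((bucket_cond_iff hw n.toNat x y hx hy).1 hc) hd
  · exact absurd ((bucket_cond_iff hw n.toNat x y hx hy).2 hd) hc
  · rfl

theorem genMat_canon {n w : Int} (hw : w ≠ 0) : genMat n w = canon w n.toNat := by
  obtain ⟨hS, hE⟩ := genMat_char (n := n) hw
  apply eq_canon hS
  intro x y hx hy
  rw [hE x y, if_pos ⟨hx, hy⟩]

theorem main_eq (n w : Int) (hpre : w ≠ 0 ∨ n ≤ 1) : genMat n w = genMat_alt n w := by
  by_cases hn : n ≤ 1
  · have halt : genMat_alt n w = List.replicate n.toNat (List.replicate n.toNat (0:Int)) := by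
      simp only [genMat_alt, if_pos hn, mat0_map_eq]
    by_cases h0 : n ≤ 0
    · have hz : n.toNat = 0 := by omega
      have hr : PySem.List.pyRange 0 n 1 = [] := PySem.List.pyRange_one_eq_nil (by omega)
      have hr0 : PySem.List.pyRange 0 ((0:Nat) : Int) 1 = [] := PySem.List.pyRange_one_eq_nil (by simp)
      simp [genMat, hr, halt, hz, hr0]
    · have hn1 : n = 1 := by omega
      subst hn1
      rw [halt]
      have h01 : PySem.List.pyRange 0 1 1 = [(0:Int)] := by
        have := PySem.List.pyRange_one_singleton (a := (0:Int)); simpa using this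
      simp [genMat, h01]
  · have hw : w ≠ 0 := hpre.resolve_right hn
    rw [genMat_canon hw, genMat_alt_char hw hn]

-- ===== VERDICT (by name: the statement is the Claim_ definition above) =====
theorem genMat_spec : Claim_equal_genMat := by
  intro n w _ hpre
  exact main_eq n w hpre
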